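-- pv_equiv track=rewrite | github.com/hallamlab/TreeSAPP | treesapp/utilities.py | convert_outer_to_inner_nodes
-- ===== SOURCE A (Python) =====
-- def convert_outer_to_inner_nodes(clusters, internal_node_map):
--     leaf_annotation_map = dict()
--     for cluster in clusters.keys():
--         if cluster not in leaf_annotation_map:
--             leaf_annotation_map[cluster] = list()
--         for frond_tips in clusters[cluster]:
--             start, end = frond_tips
--             # Find the minimum set that includes both start and end
--             warm_front = dict()
--             # Add all the potential internal nodes
--             for inode in internal_node_map:
--                 clade = internal_node_map[inode]
--                 if start in clade:
--                     warm_front[inode] = clade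
--             for inode in sorted(warm_front, key=lambda x: len(warm_front[x])):
--                 if end in warm_front[inode]:
--                     leaf_annotation_map[cluster].append(inode)
--                     break
--     return leaf_annotation_map
-- ===== SOURCE B (Python) =====
-- def convert_outer_to_inner_nodes(clusters, internal_node_map):
--     # Sort all internal nodes by clade size ONCE (stable), then each leaf pair is a
--     # single scan for the first (i.e. smallest) node containing both endpoints.
--     by_size = sorted(internal_node_map.items(), key=lambda kv: len(kv[1]))
--     leaf_annotation_map = {}
--     for cluster, frond_list in clusters.items():
--         hits = []
--         for start, end in frond_list:
--             for inode, clade in by_size: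
--                 if start in clade and end in clade:
--                     hits.append(inode)
--                     break
--         leaf_annotation_map[cluster] = hits
--     return leaf_annotation_map
-- ===== Notes on version B (the rewrite author's own statement) =====
-- stated objective: faster
-- what changed: B sorts the internal-node map by clade size once up front and answers each leaf pair with a single first-hit scan over that sorted list, instead of A's per-pair rebuild of a candidate dict followed by a per-pair sort of its keys.
import Mathlib
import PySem

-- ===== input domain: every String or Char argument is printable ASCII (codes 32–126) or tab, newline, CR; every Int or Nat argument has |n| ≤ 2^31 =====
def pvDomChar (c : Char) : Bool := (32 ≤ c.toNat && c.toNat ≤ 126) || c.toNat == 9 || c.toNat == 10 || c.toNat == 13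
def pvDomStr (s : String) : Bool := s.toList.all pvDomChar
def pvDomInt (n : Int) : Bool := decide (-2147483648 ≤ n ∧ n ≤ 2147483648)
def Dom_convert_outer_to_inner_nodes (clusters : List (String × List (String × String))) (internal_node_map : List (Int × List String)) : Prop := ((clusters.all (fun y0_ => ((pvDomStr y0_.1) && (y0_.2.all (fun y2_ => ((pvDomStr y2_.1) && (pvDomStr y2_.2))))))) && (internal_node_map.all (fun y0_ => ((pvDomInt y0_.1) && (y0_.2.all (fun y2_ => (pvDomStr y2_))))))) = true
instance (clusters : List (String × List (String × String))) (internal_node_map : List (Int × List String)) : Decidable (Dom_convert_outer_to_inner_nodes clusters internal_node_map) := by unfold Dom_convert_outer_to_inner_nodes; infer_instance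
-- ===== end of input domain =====

-- B sorts the internal-node map by clade size ONCE and answers each leaf pair by a single
-- first-hit scan over that sorted list, instead of A's per-pair candidate dict + per-pair sort.

-- ===== PORT A =====
def convert_outer_to_inner_nodes (clusters : List (String × List (String × String))) (internal_node_map : List (Int × List String)) : List (String × List Int) :=
  let cd := PySem.Dict.ofList clusters
  let im := PySem.Dict.ofList internal_node_map
  let lam := cd.keys.foldl (fun (lam : PySem.Dict String (List Int)) cluster =>
    let lam := if lam.contains cluster then lam else lam.insert cluster []
    (cd.getD cluster []).foldl (fun lam frond_tips =>
      let start := frond_tips.1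
      let stop := frond_tips.2
      -- warm_front: all internal nodes whose clade contains start
      let warm_front := im.keys.foldl (fun (w : PySem.Dict Int (List String)) inode =>
        let clade := im.getD inode []
        if clade.contains start then w.insert inode clade else w) PySem.Dict.empty
      -- first key, in order of increasing clade size, whose clade contains stop
      match (PySem.List.sorted warm_front.keys (fun x => (warm_front.getD x []).length)).find?
              (fun inode => (warm_front.getD inode []).contains stop) with
      | some inode => lam.modify cluster [] (fun v => v ++ [inode])
      | none => lam) lam) PySem.Dict.empty
  lam.items

-- ===== PORT B =====
def convert_outer_to_inner_nodes_alt (clusters : List (String × List (String × String))) (internal_node_map : List (Int × List String)) : List (String × List Int) :=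
  let by_size := PySem.List.sorted (PySem.Dict.ofList internal_node_map).items (fun kv => kv.2.length)
  let lam := (PySem.Dict.ofList clusters).items.foldl (fun (r : PySem.Dict String (List Int)) ckv =>
    let hits := ckv.2.foldl (fun (hits : List Int) se =>
      match by_size.find? (fun kv => kv.2.contains se.1 && kv.2.contains se.2) with
      | some kv => hits ++ [kv.1]
      | none => hits) []
    r.insert ckv.1 hits) PySem.Dict.empty
  lam.items

-- ===== PRECONDITION & SPEC =====
def Spec_convert_outer_to_inner_nodes (clusters : List (String × List (String × String))) (internal_node_map : List (Int × List String)) (out : List (String × List Int)) : Prop := out = convert_outer_to_inner_nodes_alt clusters internal_node_map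
instance (clusters : List (String × List (String × String))) (internal_node_map : List (Int × List String)) (out : List (String × List Int)) : Decidable (Spec_convert_outer_to_inner_nodes clusters internal_node_map out) := by unfold Spec_convert_outer_to_inner_nodes; infer_instance

-- ===== CLAIM (what is proved, stated in full; the proofs are below) =====
def Claim_equal_convert_outer_to_inner_nodes : Prop := ∀ (clusters : List (String × List (String × String))) (internal_node_map : List (Int × List String)), Dom_convert_outer_to_inner_nodes clusters internal_node_map → Spec_convert_outer_to_inner_nodes clusters internal_node_map (convert_outer_to_inner_nodes clusters internal_node_map)

-- ===== LEMMAS AND PROOFS =====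

-- find? over a filtered list is find? with the conjoined predicate
theorem pv_find?_filter {α : Type} (l : List α) (p q : α → Bool) :
    (l.filter p).find? q = l.find? (fun x => p x && q x) := by
  induction l with
  | nil => rfl
  | cons a t ih => cases hp : p a <;> cases hq : q a <;> simp [List.filter, List.find?, hp, hq, ih]

-- find? only depends on the predicate's values on members
theorem pv_find?_congr_mem {α : Type} {l : List α} {p q : α → Bool}
    (h : ∀ x ∈ l, p x = q x) : l.find? p = l.find? q := by
  induction l with
  | nil => rfl
  | cons a t ih =>
    have ha := h a (by simp)
    simp only [List.find?, ha]
    cases q a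
    · exact ih (fun x hx => h x (by simp [hx]))
    · rfl

theorem pv_insertBy_cons {α : Type} (bf : α → α → Bool) (x z : α) (t : List α) :
    PySem.List.insertBy bf x (z :: t)
      = if bf x z then x :: z :: t else z :: PySem.List.insertBy bf x t := rfl

-- mapping commutes with insertBy when the comparison is preserved
theorem pv_map_insertBy {α β : Type} (g : α → β) (bf : α → α → Bool) (bf' : β → β → Bool)
    (x : α) (ys : List α) (h : ∀ y ∈ ys, bf' (g x) (g y) = bf x y) :
    (PySem.List.insertBy bf x ys).map g = PySem.List.insertBy bf' (g x) (ys.map g) := by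
  induction ys with
  | nil => rfl
  | cons z t ih =>
    have hz := h z (by simp)
    rw [pv_insertBy_cons, List.map_cons, pv_insertBy_cons, hz]
    cases bf x z
    · simp only [Bool.false_eq_true, if_false, List.map_cons]
      rw [ih (fun y hy => h y (by simp [hy]))]
    · simp

-- sorting a mapped list with a compatible key is the map of the sorted list
theorem pv_sorted_map_aux {α β : Type} (g : α → β) (key : α → Nat) (key' : β → Nat)
    (xs : List α) : ∀ (acc : List α), (∀ x ∈ xs, key' (g x) = key x) → (∀ y ∈ acc, key' (g y) = key y) →
    (xs.map g).foldl (fun a b => PySem.List.insertBy (fun a b => decide (key' a < key' b)) b a) (acc.map g)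
      = (xs.foldl (fun a b => PySem.List.insertBy (fun a b => decide (key a < key b)) b a) acc).map g := by
  induction xs with
  | nil => intro acc _ _; rfl
  | cons hd tl ih =>
    intro acc hxs hacc
    simp only [List.map, List.foldl]
    rw [← pv_map_insertBy g _ _ hd acc
      (fun y hy => by rw [hxs hd (by simp), hacc y hy])]
    exact ih _ (fun z hz => hxs z (by simp [hz]))
      (fun y hy => by rcases (PySem.List.mem_insertBy _ _ _ _).1 hy with h' | h'
                      · rw [h']; exact hxs hd (by simp)
                      · exact hacc y h')

theorem pv_sorted_map {α β : Type} (g : α → β) (key : α → Nat) (key' : β → Nat)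
    (xs : List α) (h : ∀ x ∈ xs, key' (g x) = key x) :
    PySem.List.sorted (xs.map g) key' = (PySem.List.sorted xs key).map g := by
  rw [PySem.List.sorted_eq_foldl_insertBy, PySem.List.sorted_eq_foldl_insertBy]
  simpa using pv_sorted_map_aux g key key' xs [] h (by simp)

-- insertBy at the front when x goes before everything
theorem pv_insertBy_all {α : Type} (bf : α → α → Bool) (x : α) (l : List α)
    (h : ∀ w ∈ l, bf x w = true) : PySem.List.insertBy bf x l = x :: l := by
  cases l with
  | nil => rfl
  | cons z t => rw [pv_insertBy_cons, if_pos (h z (by simp))]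

-- filtering out the inserted element
theorem pv_filter_insertBy_neg {α : Type} (bf : α → α → Bool) (q : α → Bool) (x : α)
    (ys : List α) (hx : q x = false) :
    (PySem.List.insertBy bf x ys).filter q = ys.filter q := by
  induction ys with
  | nil => simp [PySem.List.insertBy, hx]
  | cons z t ih =>
    rw [pv_insertBy_cons]
    cases hb : bf x z <;> cases hz : q z <;> simp [List.filter, hx, hz, ih]

-- filtering keeps the inserted element in place (the list being inserted into is sorted by key)
theorem pv_filter_insertBy_pos {α : Type} (key : α → Nat) (q : α → Bool) (x : α)
    (ys : List α) (hx : q x = true)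
    (hs : ys.Pairwise (fun a b => key a ≤ key b)) :
    (PySem.List.insertBy (fun a b => decide (key a < key b)) x ys).filter q
      = PySem.List.insertBy (fun a b => decide (key a < key b)) x (ys.filter q) := by
  induction ys with
  | nil => simp [PySem.List.insertBy, hx]
  | cons z t ih =>
    rcases List.pairwise_cons.1 hs with ⟨hz, ht⟩
    rw [pv_insertBy_cons]
    by_cases hlt : key x < key z
    · rw [if_pos (by simpa using hlt)]
      cases hz2 : q z
      · have h1 : List.filter q (x :: z :: t) = x :: t.filter q := by
          simp [List.filter, hx, hz2]
        have h2 : List.filter q (z :: t) = t.filter q := by simp [List.filter, hz2]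
        rw [h1, h2, pv_insertBy_all _ x _
          (fun w hw => decide_eq_true (lt_of_lt_of_le hlt (hz w (List.mem_of_mem_filter hw))))]
      · have h1 : List.filter q (x :: z :: t) = x :: z :: t.filter q := by
          simp [List.filter, hx, hz2]
        have h2 : List.filter q (z :: t) = z :: t.filter q := by simp [List.filter, hz2]
        rw [h1, h2, pv_insertBy_cons, if_pos (by simpa using hlt)]
    · rw [if_neg (by simpa using hlt)]
      cases hz2 : q z
      · have h1 : List.filter q (z :: PySem.List.insertBy (fun a b => decide (key a < key b)) x t)
            = (PySem.List.insertBy (fun a b => decide (key a < key b)) x t).filter q := by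
          simp [List.filter, hz2]
        have h2 : List.filter q (z :: t) = t.filter q := by simp [List.filter, hz2]
        rw [h1, h2, ih ht]
      · have h1 : List.filter q (z :: PySem.List.insertBy (fun a b => decide (key a < key b)) x t)
            = z :: (PySem.List.insertBy (fun a b => decide (key a < key b)) x t).filter q := by
          simp [List.filter, hz2]
        have h2 : List.filter q (z :: t) = z :: t.filter q := by simp [List.filter, hz2]
        rw [h1, h2, ih ht, pv_insertBy_cons, if_neg (by simpa using hlt)]

theorem pv_sorted_append_singleton {α : Type} (key : α → Nat) (l : List α) (x : α) :
    PySem.List.sorted (l ++ [x]) key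
      = PySem.List.insertBy (fun a b => decide (key a < key b)) x (PySem.List.sorted l key) := by
  rw [PySem.List.sorted_eq_foldl_insertBy, PySem.List.sorted_eq_foldl_insertBy, List.foldl_append]
  rfl

-- stable sort commutes with filter
theorem pv_sorted_filter {α : Type} (key : α → Nat) (q : α → Bool) (xs : List α) :
    (PySem.List.sorted xs key).filter q = PySem.List.sorted (xs.filter q) key := by
  induction xs using List.reverseRecOn with
  | nil => rfl
  | append_singleton t x ih =>
    rw [pv_sorted_append_singleton, List.filter_append]
    cases hx : q x
    · have h1 : List.filter q [x] = [] := by simp [List.filter, hx]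
      rw [h1, List.append_nil, pv_filter_insertBy_neg _ _ _ _ hx, ih]
    · have h1 : List.filter q [x] = [x] := by simp [List.filter, hx]
      rw [h1, pv_filter_insertBy_pos key q x _ hx (PySem.List.sorted_pairwise t key), ih,
          pv_sorted_append_singleton]

-- B's selection, as a named function (used only by the proofs)
def pvPick (bySize : List (Int × List String)) (se : String × String) : Option Int :=
  (bySize.find? (fun kv => kv.2.contains se.1 && kv.2.contains se.2)).map Prod.fst

def pvHits (bySize : List (Int × List String)) (pairs : List (String × String)) : List Int :=
  pairs.foldl (fun acc se => match pvPick bySize se with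
    | some k => acc ++ [k]
    | none => acc) []

-- ===== per-pair scan: A's warm_front + sort + find equals B's single scan =====

theorem pv_warm_items (im : PySem.Dict Int (List String)) (hnd : im.keys.Nodup) (s : String) :
    (im.keys.foldl (fun (w : PySem.Dict Int (List String)) inode =>
        if (im.getD inode []).contains s then w.insert inode (im.getD inode []) else w)
      PySem.Dict.empty).items
      = im.items.filter (fun kv => kv.2.contains s) := by
  have hkeys' : im.keys = im.items.map Prod.fst := rfl
  have hfold : im.keys.foldl (fun (w : PySem.Dict Int (List String)) inode =>
        if (im.getD inode []).contains s then w.insert inode (im.getD inode []) else w)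
        PySem.Dict.empty
      = im.items.foldl (fun (w : PySem.Dict Int (List String)) kv =>
        if kv.2.contains s then w.insert kv.1 kv.2 else w) PySem.Dict.empty := by
    rw [hkeys', List.foldl_map]
    refine PySem.List.foldl_congr_mem _ _ _ _ (fun acc kv hkv => ?_)
    have hgd : im.getD kv.1 [] = kv.2 :=
      PySem.Dict.getD_of_mem_items im (by simpa using hkv) hnd []
    simp [hgd]
  rw [hfold, PySem.List.foldl_if_eq_foldl_filter (fun kv : Int × List String => kv.2.contains s)
    (fun (w : PySem.Dict Int (List String)) kv => w.insert kv.1 kv.2) im.items PySem.Dict.empty]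
  rw [PySem.Dict.items_foldl_insert_fresh (im.items.filter (fun kv => kv.2.contains s))
    Prod.fst Prod.snd PySem.Dict.empty (fun a _ => PySem.Dict.contains_empty a.1)
    ((List.filter_sublist.map Prod.fst).nodup (by rw [← hkeys']; exact hnd))]
  simp [PySem.Dict.empty]

theorem pv_pick_eq (im : PySem.Dict Int (List String)) (hnd : im.keys.Nodup) (s e : String) :
    (PySem.List.sorted
        (im.keys.foldl (fun (w : PySem.Dict Int (List String)) inode =>
          if (im.getD inode []).contains s then w.insert inode (im.getD inode []) else w)
          PySem.Dict.empty).keys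
        (fun x => (((im.keys.foldl (fun (w : PySem.Dict Int (List String)) inode =>
          if (im.getD inode []).contains s then w.insert inode (im.getD inode []) else w)
          PySem.Dict.empty)).getD x []).length)).find?
      (fun inode => (((im.keys.foldl (fun (w : PySem.Dict Int (List String)) inode =>
          if (im.getD inode []).contains s then w.insert inode (im.getD inode []) else w)
          PySem.Dict.empty)).getD inode []).contains e)
    = pvPick (PySem.List.sorted im.items (fun kv => kv.2.length)) (s, e) := by
  set warm := im.keys.foldl (fun (w : PySem.Dict Int (List String)) inode =>
      if (im.getD inode []).contains s then w.insert inode (im.getD inode []) else w)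
    PySem.Dict.empty with hwarm
  set W := im.items.filter (fun kv => kv.2.contains s) with hW
  have hitems : warm.items = W := pv_warm_items im hnd s
  have hkeys : warm.keys = W.map Prod.fst := by
    show warm.items.map _ = _
    rw [hitems]
  have hndW : (W.map Prod.fst).Nodup :=
    (List.filter_sublist.map Prod.fst).nodup hnd
  have hndWk : warm.keys.Nodup := by rw [hkeys]; exact hndW
  have hget : ∀ p ∈ W, warm.getD p.1 [] = p.2 := by
    intro p hp
    exact PySem.Dict.getD_of_mem_items warm (by rw [hitems]; simpa using hp) hndWk []
  rw [hkeys,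
    pv_sorted_map Prod.fst (fun p => p.2.length) (fun k => (warm.getD k []).length) W
      (fun p hp => by show (warm.getD p.1 []).length = p.2.length; rw [hget p hp]),
    List.find?_map]
  have hperm := PySem.List.sorted_perm W (fun p => p.2.length) false
  have hcongr : (PySem.List.sorted W (fun p => p.2.length)).find?
      ((fun inode => (warm.getD inode []).contains e) ∘ Prod.fst)
      = (PySem.List.sorted W (fun p => p.2.length)).find? (fun p => p.2.contains e) := by
    refine pv_find?_congr_mem (fun p hp => ?_)
    have hpW : p ∈ W := hperm.mem_iff.1 hp
    simp [Function.comp, hget p hpW]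
  rw [hcongr, hW, ← pv_sorted_filter (fun kv => kv.2.length) (fun kv => kv.2.contains s) im.items,
    pv_find?_filter]
  rfl

-- ===== outer loop: A's dict building equals the per-cluster map =====

theorem pv_inner_items (bS : List (Int × List String)) (c : String)
    (pairs : List (String × String)) :
    ∀ (d : PySem.Dict String (List Int)) (X : List (String × List Int)) (acc : List Int),
    d.items = X ++ [(c, acc)] → c ∉ X.map Prod.fst → (X.map Prod.fst).Nodup →
    (pairs.foldl (fun lam se => match pvPick bS se with
        | some k => lam.modify c [] (fun v => v ++ [k])
        | none => lam) d).items
      = X ++ [(c, pairs.foldl (fun a se => match pvPick bS se with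
        | some k => a ++ [k]
        | none => a) acc)] := by
  induction pairs with
  | nil => intro d X acc hd _ _; simpa using hd
  | cons se t ih =>
    intro d X acc hd hc hnd
    have hkeys : d.keys = X.map Prod.fst ++ [c] := by
      show d.items.map _ = _
      rw [hd]; simp
    have hndk : d.keys.Nodup := by
      rw [hkeys]
      refine List.Nodup.append hnd (List.nodup_singleton c) ?_
      intro a ha hb
      rw [List.mem_singleton] at hb
      exact hc (hb ▸ ha)
    have hmem : (c, acc) ∈ d.items := by rw [hd]; simp
    have hgetD : d.getD c [] = acc := PySem.Dict.getD_of_mem_items d hmem hndk []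
    have hcont : d.contains c = true := by
      rw [PySem.Dict.contains_iff_mem_keys, hkeys]; simp
    simp only [List.foldl]
    cases hp : pvPick bS se with
    | none => exact ih d X acc hd hc hnd
    | some k =>
      refine ih _ X (acc ++ [k]) ?_ hc hnd
      show (d.insert c ((d.getD c []) ++ [k])).items = X ++ [(c, acc ++ [k])]
      rw [hgetD, PySem.Dict.items_insert_of_contains d _ hcont, hd, List.map_append]
      congr 1
      · have hmap : X.map (fun p => if (p.1 == c) = true then (c, acc ++ [k]) else p) = X.map id :=
          List.map_congr_left (fun p hp' => by
            have hne : p.1 ≠ c := fun h => hc (h ▸ List.mem_map_of_mem hp')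
            simp [hne])
        rw [hmap, List.map_id]
      · simp

theorem pv_outer_items (bS : List (Int × List String))
    (rest : List (String × List (String × String))) :
    ∀ (d : PySem.Dict String (List Int)),
    (d.keys ++ rest.map Prod.fst).Nodup →
    (rest.foldl (fun lam p =>
        (p.2.foldl (fun lam se => match pvPick bS se with
          | some k => lam.modify p.1 [] (fun v => v ++ [k])
          | none => lam)
          (if lam.contains p.1 then lam else lam.insert p.1 []))) d).items
      = d.items ++ rest.map (fun p => (p.1, pvHits bS p.2)) := by
  induction rest with
  | nil => intro d _; simp
  | cons p t ih =>
    intro d hnd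
    have hndk : d.keys.Nodup := (List.nodup_append.1 hnd).1
    have hfresh : p.1 ∉ d.keys := by
      intro h
      exact List.disjoint_of_nodup_append hnd h (by simp)
    have hcont : d.contains p.1 = false := by
      cases h : d.contains p.1
      · rfl
      · exact absurd ((PySem.Dict.contains_iff_mem_keys _ _).1 h) hfresh
    simp only [List.foldl]
    rw [hcont]
    simp only [Bool.false_eq_true, if_false]
    have hins : (d.insert p.1 ([] : List Int)).items = d.items ++ [(p.1, [])] :=
      PySem.Dict.items_insert_of_not_contains d _ hcont
    have hinner := pv_inner_items bS p.1 p.2 (d.insert p.1 []) d.items [] hins hfresh hndk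
    have hnd' : ((p.2.foldl (fun lam se => match pvPick bS se with
          | some k => lam.modify p.1 [] (fun v => v ++ [k])
          | none => lam) (d.insert p.1 [])).keys ++ t.map Prod.fst).Nodup := by
      have hk : (p.2.foldl (fun lam se => match pvPick bS se with
          | some k => lam.modify p.1 [] (fun v => v ++ [k])
          | none => lam) (d.insert p.1 [])).keys = d.keys ++ [p.1] := by
        show (p.2.foldl (fun lam se => match pvPick bS se with
          | some k => lam.modify p.1 [] (fun v => v ++ [k])
          | none => lam) (d.insert p.1 [])).items.map _ = _
        rw [hinner]; simp; rfl
      rw [hk]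
      simpa [List.append_assoc] using hnd
    rw [ih _ hnd', hinner]
    simp [pvHits]

-- the full equivalence
theorem pv_main (clusters : List (String × List (String × String)))
    (internal_node_map : List (Int × List String)) :
    convert_outer_to_inner_nodes clusters internal_node_map
      = convert_outer_to_inner_nodes_alt clusters internal_node_map := by
  have hndim : (PySem.Dict.ofList internal_node_map).keys.Nodup :=
    PySem.Dict.nodup_keys_ofList internal_node_map
  have hndcd : (PySem.Dict.ofList clusters).keys.Nodup :=
    PySem.Dict.nodup_keys_ofList clusters
  set cd := PySem.Dict.ofList clusters with hcd
  set im := PySem.Dict.ofList internal_node_map with him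
  set bS := PySem.List.sorted im.items (fun kv => kv.2.length) with hbS
  have hA : convert_outer_to_inner_nodes clusters internal_node_map
      = (cd.keys.foldl (fun (lam : PySem.Dict String (List Int)) cluster =>
        (cd.getD cluster []).foldl (fun lam frond_tips =>
          match (PySem.List.sorted
              (im.keys.foldl (fun (w : PySem.Dict Int (List String)) inode =>
                if (im.getD inode []).contains frond_tips.1 then w.insert inode (im.getD inode []) else w)
                PySem.Dict.empty).keys
              (fun x => (((im.keys.foldl (fun (w : PySem.Dict Int (List String)) inode =>
                if (im.getD inode []).contains frond_tips.1 then w.insert inode (im.getD inode []) else w)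
                PySem.Dict.empty)).getD x []).length)).find?
            (fun inode => (((im.keys.foldl (fun (w : PySem.Dict Int (List String)) inode =>
                if (im.getD inode []).contains frond_tips.1 then w.insert inode (im.getD inode []) else w)
                PySem.Dict.empty)).getD inode []).contains frond_tips.2) with
          | some inode => lam.modify cluster [] (fun v => v ++ [inode])
          | none => lam)
          (if lam.contains cluster then lam else lam.insert cluster [])) PySem.Dict.empty).items := rfl
  have hB : convert_outer_to_inner_nodes_alt clusters internal_node_map
      = (cd.items.foldl (fun (r : PySem.Dict String (List Int)) ckv =>
        r.insert ckv.1 (ckv.2.foldl (fun (hits : List Int) se =>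
          match bS.find? (fun kv => kv.2.contains se.1 && kv.2.contains se.2) with
          | some kv => hits ++ [kv.1]
          | none => hits) [])) PySem.Dict.empty).items := rfl
  rw [hA, hB]
  have hstep : cd.keys.foldl (fun (lam : PySem.Dict String (List Int)) cluster =>
      (cd.getD cluster []).foldl (fun lam frond_tips =>
        match (PySem.List.sorted
            (im.keys.foldl (fun (w : PySem.Dict Int (List String)) inode =>
              if (im.getD inode []).contains frond_tips.1 then w.insert inode (im.getD inode []) else w)
              PySem.Dict.empty).keys
            (fun x => (((im.keys.foldl (fun (w : PySem.Dict Int (List String)) inode =>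
              if (im.getD inode []).contains frond_tips.1 then w.insert inode (im.getD inode []) else w)
              PySem.Dict.empty)).getD x []).length)).find?
          (fun inode => (((im.keys.foldl (fun (w : PySem.Dict Int (List String)) inode =>
              if (im.getD inode []).contains frond_tips.1 then w.insert inode (im.getD inode []) else w)
              PySem.Dict.empty)).getD inode []).contains frond_tips.2) with
        | some inode => lam.modify cluster [] (fun v => v ++ [inode])
        | none => lam)
        (if lam.contains cluster then lam else lam.insert cluster [])) PySem.Dict.empty
      = cd.items.foldl (fun (lam : PySem.Dict String (List Int)) p =>
        (p.2.foldl (fun lam se => match pvPick bS se with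
          | some k => lam.modify p.1 [] (fun v => v ++ [k])
          | none => lam)
          (if lam.contains p.1 then lam else lam.insert p.1 []))) PySem.Dict.empty := by
    have hkeys' : cd.keys = cd.items.map Prod.fst := rfl
    rw [hkeys', List.foldl_map]
    refine PySem.List.foldl_congr_mem _ _ _ _ (fun acc p hp => ?_)
    have hgd : cd.getD p.1 [] = p.2 :=
      PySem.Dict.getD_of_mem_items cd (by simpa using hp) hndcd []
    rw [hgd]
    refine PySem.List.foldl_congr_mem _ _ _ _ (fun acc2 se _ => ?_)
    rw [pv_pick_eq im hndim se.1 se.2]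
  rw [hstep]
  have houter := pv_outer_items bS cd.items PySem.Dict.empty
    (by simpa using (show (cd.items.map Prod.fst).Nodup from hndcd))
  rw [houter]
  have hBfold : cd.items.foldl (fun (r : PySem.Dict String (List Int)) ckv =>
      r.insert ckv.1 (ckv.2.foldl (fun (hits : List Int) se =>
        match bS.find? (fun kv => kv.2.contains se.1 && kv.2.contains se.2) with
        | some kv => hits ++ [kv.1]
        | none => hits) [])) PySem.Dict.empty
      = cd.items.foldl (fun (r : PySem.Dict String (List Int)) ckv =>
        r.insert ckv.1 (pvHits bS ckv.2)) PySem.Dict.empty := by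
    refine PySem.List.foldl_congr_mem _ _ _ _ (fun acc ckv _ => ?_)
    congr 1
    refine PySem.List.foldl_congr_mem _ _ _ _ (fun a se _ => ?_)
    simp only [pvPick]
    cases bS.find? (fun kv => kv.2.contains se.1 && kv.2.contains se.2) <;> rfl
  rw [hBfold, PySem.Dict.items_foldl_insert_fresh cd.items Prod.fst (fun p => pvHits bS p.2)
    PySem.Dict.empty (fun a _ => PySem.Dict.contains_empty a.1) hndcd]

-- ===== VERDICT (by name: the statement is the Claim_ definition above) =====
theorem convert_outer_to_inner_nodes_spec : Claim_equal_convert_outer_to_inner_nodes := by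
  intro clusters internal_node_map _
  show _ = _
  exact pv_main clusters internal_node_map
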